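-- pv_equiv track=rewrite | github.com/stasiakozlova/Python-basics | HW2/B/B.py | solution
-- ===== SOURCE A (Python) =====
-- def solution(x):
--     new_line = ''
--     for i in range(len(x)):
--         if (x[i] == 'h') and (i != x.find('h')) and (i != x.rfind('h')):
--             x = x[:i] + 'H' + x[i+1:]
--         if (i % 3 != 0) or (i == 0):
--             new_line = new_line + x[i]
--     new_line = new_line.replace('1', 'one')
--     return new_line
-- ===== SOURCE B (Python) =====
-- def solution(x):
--     # The first/last 'h' never change, so find them once; one pass builds the result.
--     first = x.find('h')
--     last = x.rfind('h')
--     kept = [('H' if (c == 'h' and first < i < last) else c)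
--             for i, c in enumerate(x) if i == 0 or i % 3 != 0]
--     return ''.join(kept).replace('1', 'one')
-- ===== Notes on version B (the rewrite author's own statement) =====
-- stated objective: simpler
-- what changed: A rebuilds the string with slicing and recomputes find/rfind inside the loop; B computes the first/last 'h' index once and builds the kept characters in a single comprehension pass.
import Mathlib
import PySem

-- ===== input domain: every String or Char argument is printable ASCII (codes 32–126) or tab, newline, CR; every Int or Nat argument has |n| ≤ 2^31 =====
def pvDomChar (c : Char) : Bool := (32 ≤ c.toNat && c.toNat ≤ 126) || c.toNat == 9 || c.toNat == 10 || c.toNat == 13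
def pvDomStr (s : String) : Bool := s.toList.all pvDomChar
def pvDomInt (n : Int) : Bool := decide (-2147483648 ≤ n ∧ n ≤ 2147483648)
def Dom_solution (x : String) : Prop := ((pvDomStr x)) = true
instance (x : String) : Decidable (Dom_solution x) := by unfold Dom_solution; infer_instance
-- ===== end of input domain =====

-- B replaces A's in-loop find/rfind rescans and slice rebuilds by computing the
-- first/last 'h' index once and building the kept characters in a single pass (objective: simpler).

-- ===== PORT A =====
-- one iteration of A's for-loop: state = (x, new_line)
def solutionStep (st : List Char × List Char) (i : Int) : List Char × List Char :=
  let x := st.1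
  let x' := if (PySem.List.pyGetD x i ' ' == 'h')
               && !(i == PySem.Chars.find x ['h'])
               && !(i == PySem.Chars.rfind x ['h'])
            then PySem.List.slice x none (some i) ++ ['H'] ++ PySem.List.slice x (some (i+1)) none
            else x
  let nl' := if !(PySem.Int.mod i 3 == 0) || (i == 0)
             then st.2 ++ [PySem.List.pyGetD x' i ' ']
             else st.2
  (x', nl')

def solution (x : String) : String :=
  let cs := x.toList
  let st := (PySem.List.pyRange 0 (cs.length : Int)).foldl solutionStep (cs, [])
  String.ofList (PySem.Chars.replace st.2 ['1'] ['o', 'n', 'e'])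

-- ===== PORT B =====
-- B's conditional expression: 'H' if (c == 'h' and first < i < last) else c
def markChar (first last i : Int) (c : Char) : Char :=
  if c == 'h' && decide (first < i) && decide (i < last) then 'H' else c

def solution_alt (x : String) : String :=
  let cs := x.toList
  let first := PySem.Chars.find cs ['h']
  let last := PySem.Chars.rfind cs ['h']
  let kept := ((PySem.List.enumerate cs).filter
                 (fun p => (p.1 == 0) || !(PySem.Int.mod p.1 3 == 0))).map
              (fun p => markChar first last p.1 p.2)
  String.ofList (PySem.Chars.replace kept ['1'] ['o', 'n', 'e'])

-- ===== PRECONDITION & SPEC =====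
def Spec_solution (x : String) (out : String) : Prop := out = solution_alt x
instance (x : String) (out : String) : Decidable (Spec_solution x out) := by unfold Spec_solution; infer_instance

-- ===== CLAIM (what is proved, stated in full; the proofs are below) =====
def Claim_equal_solution : Prop := ∀ (x : String), Dom_solution x → Spec_solution x (solution x)

-- ===== LEMMAS AND PROOFS =====

-- x after i iterations of A's loop: middle 'h's at indices < i are uppercased
def markUpTo (cs : List Char) (f l : Int) (i : Nat) : List Char :=
  cs.mapIdx (fun j c => if j < i then markChar f l (j : Int) c else c)

-- new_line after i iterations of A's loop (before the final replace)
def nlUpTo (cs : List Char) (f l : Int) (i : Nat) : List Char :=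
  ((List.range i).filter (fun j => (j == 0) || !(j % 3 == 0))).map
    (fun (j : Nat) => markChar f l (j : Int) (cs.getD j ' '))

theorem markChar_of_ne (f l i : Int) (c : Char) (h : c ≠ 'h') : markChar f l i c = c := by
  simp [markChar, h]

theorem markChar_ne_h (f l i : Int) (c : Char) (h : c ≠ 'h') : markChar f l i c ≠ 'h' := by
  rw [markChar_of_ne f l i c h]; exact h

theorem prefix_singleton_drop (a : Char) (s : List Char) (m : Nat) :
    ([a].isPrefixOf (s.drop m)) = true ↔ m < s.length ∧ s.getD m ' ' = a := by
  cases hd : s.drop m with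
  | nil =>
    have : s.length ≤ m := List.drop_eq_nil_iff.mp hd
    simp [List.isPrefixOf]; omega
  | cons c t =>
    have h1 : s[m]? = some c := by
      rw [← List.head?_drop, hd]; rfl
    have hm : m < s.length := by
      by_contra h; rw [List.getElem?_eq_none (by omega)] at h1; simp at h1
    have h2 : s.getD m ' ' = c := by
      rw [List.getD_eq_getElem s ' ' hm]
      have := List.getElem?_eq_getElem (l := s) (i := m) hm
      rw [h1] at this
      exact (Option.some.injEq _ _).mp this.symm
    have h3 : s[m]'hm = c := by rw [← List.getD_eq_getElem s ' ' hm]; exact h2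
    simp [List.isPrefixOf, hm, h3]
    exact ⟨fun h => h.symm, fun h => h.symm⟩

theorem findgo_single (s : List Char) (k p : Nat) (hp : p < s.length)
    (hc : s.getD p ' ' = 'h') (hmin : ∀ j < p, s.getD j ' ' ≠ 'h') :
    PySem.Chars.find.go ['h'] s k = ((k + p : Nat) : Int) := by
  induction s generalizing k p with
  | nil => simp at hp
  | cons c t ih =>
    rw [PySem.Chars.find.go]
    by_cases hc0 : c = 'h'
    · have hp0 : p = 0 := by
        by_contra h
        exact hmin 0 (by omega) (by simpa using hc0)
      subst hp0
      simp [List.isPrefixOf, hc0]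
    · have hp0 : p ≠ 0 := by
        intro h; subst h; simp at hc; exact hc0 hc
      obtain ⟨p', rfl⟩ : ∃ p', p = p' + 1 := ⟨p - 1, by omega⟩
      have hpre : (['h'].isPrefixOf (c :: t)) = false := by
        simp [List.isPrefixOf]; exact fun h => hc0 h.symm
      rw [hpre]
      simp only [Bool.false_eq_true, if_false]
      have := ih (k + 1) p' (by simpa using hp) (by simpa using hc)
        (fun j hj => by simpa using hmin (j + 1) (by omega))
      rw [this]; push_cast; ring

theorem find_single (s : List Char) (p : Nat) (hp : p < s.length)
    (hc : s.getD p ' ' = 'h') (hmin : ∀ j < p, s.getD j ' ' ≠ 'h') :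
    PySem.Chars.find s ['h'] = (p : Int) := by
  have := findgo_single s 0 p hp hc hmin
  simpa [PySem.Chars.find] using this

theorem rfindgo_single (s : List Char) (p : Nat) (hp : p < s.length)
    (hc : s.getD p ' ' = 'h') (hmax : ∀ j, p < j → j < s.length → s.getD j ' ' ≠ 'h')
    (j : Nat) (hj : p ≤ j) :
    PySem.Chars.rfind.go s ['h'] j = (p : Int) := by
  induction j with
  | zero =>
    have hp0 : p = 0 := by omega
    subst hp0
    rw [PySem.Chars.rfind.go]
    have := (prefix_singleton_drop 'h' s 0).mpr ⟨hp, hc⟩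
    simp only [List.drop_zero] at this
    simp [this]
  | succ j ih =>
    rw [PySem.Chars.rfind.go]
    by_cases hpj : p = j + 1
    · subst hpj
      have := (prefix_singleton_drop 'h' s (j + 1)).mpr ⟨hp, hc⟩
      simp [this]
    · have hple : p ≤ j := by omega
      have hfalse : (['h'].isPrefixOf (s.drop (j + 1))) = false := by
        rw [Bool.eq_false_iff]; intro hT
        obtain ⟨h1, h2⟩ := (prefix_singleton_drop _ _ _).mp hT
        exact hmax (j + 1) (by omega) h1 h2
      rw [hfalse]
      simp only [Bool.false_eq_true, if_false]
      exact ih hple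

theorem rfind_single (s : List Char) (p : Nat) (hp : p < s.length)
    (hc : s.getD p ' ' = 'h') (hmax : ∀ j, p < j → j < s.length → s.getD j ' ' ≠ 'h') :
    PySem.Chars.rfind s ['h'] = (p : Int) := by
  have := rfindgo_single s p hp hc hmax s.length (by omega)
  simpa [PySem.Chars.rfind] using this

theorem length_markUpTo (cs : List Char) (f l : Int) (i : Nat) :
    (markUpTo cs f l i).length = cs.length := by simp [markUpTo]

theorem getD_markUpTo (cs : List Char) (f l : Int) (i j : Nat) (hj : j < cs.length) :
    (markUpTo cs f l i).getD j ' ' =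
      if j < i then markChar f l (j : Int) (cs.getD j ' ') else cs.getD j ' ' := by
  have h1 : j < (markUpTo cs f l i).length := by rw [length_markUpTo]; exact hj
  rw [List.getD_eq_getElem _ _ h1, List.getD_eq_getElem _ _ hj]
  simp [markUpTo, List.getElem_mapIdx]

theorem markUpTo_zero (cs : List Char) (f l : Int) : markUpTo cs f l 0 = cs := by
  apply List.ext_getElem (by simp [markUpTo])
  intro j h1 h2
  simp [markUpTo, List.getElem_mapIdx]

theorem mark_succ (cs : List Char) (f l : Int) (i : Nat) (hi : i < cs.length) :
    markUpTo cs f l (i + 1) =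
      (markUpTo cs f l i).set i (markChar f l (i : Int) (cs.getD i ' ')) := by
  apply List.ext_getElem (by simp [markUpTo])
  intro j h1 h2
  rw [List.getElem_set]
  by_cases hji : i = j
  · subst hji
    simp [markUpTo, List.getElem_mapIdx, List.getElem?_eq_getElem hi]
  · have h3 : j < cs.length := by simpa [markUpTo] using h1
    simp only [markUpTo, List.getElem_mapIdx, if_neg hji]
    have : (j < i + 1) ↔ (j < i) := by omega
    simp [this]

theorem find_markUpTo (cs : List Char) (f l : Nat) (i : Nat)
    (hfn : f < cs.length) (hfh : cs.getD f ' ' = 'h') (hfmin : ∀ j < f, cs.getD j ' ' ≠ 'h') :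
    PySem.Chars.find (markUpTo cs (f : Int) (l : Int) i) ['h'] = (f : Int) := by
  apply find_single _ f (by rw [length_markUpTo]; exact hfn)
  · rw [getD_markUpTo _ _ _ _ _ hfn]
    split
    · simp [markChar]
      exact hfh
    · exact hfh
  · intro j hj
    have hjn : j < cs.length := by omega
    rw [getD_markUpTo _ _ _ _ _ hjn]
    split
    · exact markChar_ne_h _ _ _ _ (hfmin j hj)
    · exact hfmin j hj

theorem rfind_markUpTo (cs : List Char) (f l : Nat) (i : Nat)
    (hln : l < cs.length) (hlh : cs.getD l ' ' = 'h')
    (hlmax : ∀ j, l < j → j < cs.length → cs.getD j ' ' ≠ 'h') :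
    PySem.Chars.rfind (markUpTo cs (f : Int) (l : Int) i) ['h'] = (l : Int) := by
  apply rfind_single _ l (by rw [length_markUpTo]; exact hln)
  · rw [getD_markUpTo _ _ _ _ _ hln]
    split
    · simp [markChar]
      exact hlh
    · exact hlh
  · intro j hj hjn
    rw [length_markUpTo] at hjn
    rw [getD_markUpTo _ _ _ _ _ hjn]
    split
    · exact markChar_ne_h _ _ _ _ (hlmax j hj hjn)
    · exact hlmax j hj hjn

theorem nl_cond_eq (i : Nat) :
    (!(PySem.Int.mod (i : Int) 3 == 0) || ((i : Int) == 0)) = ((i == 0) || !(i % 3 == 0)) := by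
  have : PySem.Int.mod (i : Int) 3 = ((i % 3 : Nat) : Int) := by
    exact_mod_cast PySem.Int.mod_natCast i 3
  rw [this]
  apply Bool.eq_iff_iff.mpr
  simp; omega

theorem step_eq (cs : List Char) (f l : Nat)
    (hfn : f < cs.length) (hfh : cs.getD f ' ' = 'h') (hfmin : ∀ j < f, cs.getD j ' ' ≠ 'h')
    (hln : l < cs.length) (hlh : cs.getD l ' ' = 'h')
    (hlmax : ∀ j, l < j → j < cs.length → cs.getD j ' ' ≠ 'h')
    (i : Nat) (hi : i < cs.length) (nl : List Char) :
    solutionStep (markUpTo cs (f : Int) (l : Int) i, nl) (i : Int) =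
      (markUpTo cs (f : Int) (l : Int) (i + 1),
       if (i == 0) || !(i % 3 == 0)
       then nl ++ [markChar (f : Int) (l : Int) (i : Int) (cs.getD i ' ')]
       else nl) := by
  have hx : PySem.List.pyGetD (markUpTo cs (f : Int) (l : Int) i) (i : Int) ' ' = cs.getD i ' ' := by
    rw [PySem.List.pyGetD_natCast, getD_markUpTo _ _ _ _ _ hi]
    simp
  have hcond : ((cs.getD i ' ' == 'h') && !((i : Int) == (f : Int)) && !((i : Int) == (l : Int)))
      = (cs.getD i ' ' == 'h' && decide ((f : Int) < (i : Int)) && decide ((i : Int) < (l : Int))) := by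
    by_cases hc : cs.getD i ' ' = 'h'
    · have hfi : f ≤ i := by by_contra h; exact hfmin i (by omega) hc
      have hil : i ≤ l := by by_contra h; exact hlmax i (by omega) hi hc
      have hce : (cs.getD i ' ' == 'h') = true := by simp only [beq_iff_eq]; exact hc
      rw [hce]
      apply Bool.eq_iff_iff.mpr
      simp
      omega
    · have hce : (cs.getD i ' ' == 'h') = false := by
        simp only [beq_eq_false_iff_ne, ne_eq]
        exact hc
      rw [hce]
      simp
  have hsucc : markUpTo cs (f : Int) (l : Int) (i + 1) =
      (markUpTo cs (f : Int) (l : Int) i).set i (markChar (f : Int) (l : Int) (i : Int) (cs.getD i ' ')) :=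
    mark_succ cs _ _ i hi
  have hself : (markUpTo cs (f : Int) (l : Int) i)[i]'(by rw [length_markUpTo]; exact hi) = cs.getD i ' ' := by
    have := getD_markUpTo cs (f : Int) (l : Int) i i hi
    rw [List.getD_eq_getElem _ _ (by rw [length_markUpTo]; exact hi)] at this
    simpa using this
  unfold solutionStep
  simp only [hx, find_markUpTo cs f l i hfn hfh hfmin, rfind_markUpTo cs f l i hln hlh hlmax, hcond]
  have hx' : ∀ b : Bool, b = (cs.getD i ' ' == 'h' && decide ((f : Int) < (i : Int)) && decide ((i : Int) < (l : Int))) →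
      (if b = true
       then PySem.List.slice (markUpTo cs (f : Int) (l : Int) i) none (some (i : Int)) ++ ['H'] ++
            PySem.List.slice (markUpTo cs (f : Int) (l : Int) i) (some ((i : Int) + 1)) none
       else markUpTo cs (f : Int) (l : Int) i) = markUpTo cs (f : Int) (l : Int) (i + 1) := by
    intro b hb
    cases hb' : b with
    | true =>
      rw [hb'] at hb
      have hmk : markChar (f : Int) (l : Int) (i : Int) (cs.getD i ' ') = 'H' := by
        simp only [markChar]
        rw [← hb]; rfl
      have h1 : PySem.List.slice (markUpTo cs (f : Int) (l : Int) i) none (some (i : Int)) =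
          (markUpTo cs (f : Int) (l : Int) i).take i := PySem.List.slice_to_natCast _ _
      have h2 : PySem.List.slice (markUpTo cs (f : Int) (l : Int) i) (some ((i : Int) + 1)) none =
          (markUpTo cs (f : Int) (l : Int) i).drop (i + 1) := by
        have : ((i : Int) + 1) = ((i + 1 : Nat) : Int) := by push_cast; ring
        rw [this]
        exact PySem.List.slice_from_natCast _ _
      simp only [h1, h2]
      rw [hsucc, hmk]
      rw [List.set_eq_take_cons_drop 'H' (by rw [length_markUpTo]; exact hi)]
      simp
    | false =>
      rw [hb'] at hb
      simp only [Bool.false_eq_true, if_false]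
      have hmk : markChar (f : Int) (l : Int) (i : Int) (cs.getD i ' ') = cs.getD i ' ' := by
        simp only [markChar]
        rw [← hb]; rfl
      rw [hsucc, hmk, ← hself, List.set_getElem_self]
  rw [hx' _ rfl]
  rw [nl_cond_eq i]
  congr 1
  split
  · congr 1
    rw [PySem.List.pyGetD_natCast, getD_markUpTo _ _ _ _ _ hi]
    simp
  · rfl

theorem inv_loop (cs : List Char) (f l : Nat)
    (hfn : f < cs.length) (hfh : cs.getD f ' ' = 'h') (hfmin : ∀ j < f, cs.getD j ' ' ≠ 'h')
    (hln : l < cs.length) (hlh : cs.getD l ' ' = 'h')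
    (hlmax : ∀ j, l < j → j < cs.length → cs.getD j ' ' ≠ 'h') :
    ∀ i, i ≤ cs.length →
      (PySem.List.pyRange 0 (i : Int)).foldl solutionStep (cs, []) =
        (markUpTo cs (f : Int) (l : Int) i, nlUpTo cs (f : Int) (l : Int) i) := by
  intro i
  induction i with
  | zero => simp [markUpTo_zero, nlUpTo, PySem.List.pyRange]
  | succ i ih =>
    intro h
    have hsplit : PySem.List.pyRange 0 ((i + 1 : Nat) : Int) =
        PySem.List.pyRange 0 (i : Int) ++ [(i : Int)] := by
      rw [PySem.List.pyRange_one_append 0 (i : Int) ((i + 1 : Nat) : Int) (by omega) (by omega)]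
      rw [PySem.List.pyRange_one_cons (a := (i : Int)) (b := ((i + 1 : Nat) : Int)) (by push_cast; omega)]
      push_cast
      simp [PySem.List.pyRange]
    rw [hsplit, List.foldl_append, ih (by omega)]
    simp only [List.foldl_cons, List.foldl_nil]
    rw [step_eq cs f l hfn hfh hfmin hln hlh hlmax i (by omega)]
    congr 1
    rw [nlUpTo, nlUpTo, List.range_succ, List.filter_append, List.map_append]
    simp only [List.filter_cons, List.filter_nil]
    split
    · simp
    · simp

-- no-'h' case: x never changes
theorem step_eq_nh (cs : List Char) (hno : ∀ j < cs.length, cs.getD j ' ' ≠ 'h')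
    (i : Nat) (hi : i < cs.length) (nl : List Char) :
    solutionStep (cs, nl) (i : Int) =
      (cs, if (i == 0) || !(i % 3 == 0) then nl ++ [cs.getD i ' '] else nl) := by
  have hx : PySem.List.pyGetD cs (i : Int) ' ' = cs.getD i ' ' := PySem.List.pyGetD_natCast _ _ _
  have hc : (cs.getD i ' ' == 'h') = false := by
    simp only [beq_eq_false_iff_ne, ne_eq]; exact hno i hi
  unfold solutionStep
  simp only [hx, hc, Bool.false_and, Bool.false_eq_true, if_false, nl_cond_eq i]

theorem inv_loop_nh (cs : List Char) (hno : ∀ j < cs.length, cs.getD j ' ' ≠ 'h') :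
    ∀ i, i ≤ cs.length →
      (PySem.List.pyRange 0 (i : Int)).foldl solutionStep (cs, []) =
        (cs, ((List.range i).filter (fun j => (j == 0) || !(j % 3 == 0))).map
               (fun j => cs.getD j ' ')) := by
  intro i
  induction i with
  | zero => simp [PySem.List.pyRange]
  | succ i ih =>
    intro h
    have hsplit : PySem.List.pyRange 0 ((i + 1 : Nat) : Int) =
        PySem.List.pyRange 0 (i : Int) ++ [(i : Int)] := by
      rw [PySem.List.pyRange_one_append 0 (i : Int) ((i + 1 : Nat) : Int) (by omega) (by omega)]
      rw [PySem.List.pyRange_one_cons (a := (i : Int)) (b := ((i + 1 : Nat) : Int)) (by push_cast; omega)]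
      push_cast
      simp [PySem.List.pyRange]
    rw [hsplit, List.foldl_append, ih (by omega)]
    simp only [List.foldl_cons, List.foldl_nil]
    rw [step_eq_nh cs hno i (by omega)]
    congr 1
    rw [List.range_succ, List.filter_append, List.map_append]
    simp only [List.filter_cons, List.filter_nil]
    split
    · simp
    · simp

theorem enumerate_eq (cs : List Char) (k : Int) :
    PySem.List.enumerate cs k = cs.mapIdx (fun j c => (k + (j : Int), c)) := by
  induction cs generalizing k with
  | nil => rw [PySem.List.enumerate]; simp
  | cons c t ih =>
    rw [PySem.List.enumerate]
    rw [List.mapIdx_cons, ih (k + 1)]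
    simp only [Nat.cast_zero, add_zero, List.cons.injEq, true_and]
    apply List.ext_getElem (by simp)
    intro j h1 h2
    simp only [List.getElem_mapIdx, Prod.mk.injEq]
    constructor
    · push_cast; ring
    · trivial

theorem enumerate_zero_eq (cs : List Char) :
    PySem.List.enumerate cs 0 =
      (List.range cs.length).map (fun (j : Nat) => ((j : Int), cs.getD j ' ')) := by
  rw [enumerate_eq]
  apply List.ext_getElem (by simp)
  intro j h1 h2
  simp only [List.getElem_mapIdx, List.getElem_map, List.getElem_range]
  have h3 : j < cs.length := by simpa using h1
  rw [List.getD_eq_getElem cs ' ' h3]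
  simp

theorem filter_cond_eq (j : Nat) :
    ((((j : Int)) == 0) || !(PySem.Int.mod ((j : Int)) 3 == 0)) = ((j == 0) || !(j % 3 == 0)) := by
  have : PySem.Int.mod (j : Int) 3 = ((j % 3 : Nat) : Int) := by
    exact_mod_cast PySem.Int.mod_natCast j 3
  rw [this]
  apply Bool.eq_iff_iff.mpr
  simp; omega

-- B's kept list, written over List.range
theorem alt_kept_eq (cs : List Char) (first last : Int) :
    ((PySem.List.enumerate cs).filter
        (fun p => (p.1 == 0) || !(PySem.Int.mod p.1 3 == 0))).map
      (fun p => markChar first last p.1 p.2) =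
    ((List.range cs.length).filter (fun j => (j == 0) || !(j % 3 == 0))).map
      (fun (j : Nat) => markChar first last (j : Int) (cs.getD j ' ')) := by
  rw [show PySem.List.enumerate cs = PySem.List.enumerate cs 0 from rfl]
  rw [enumerate_zero_eq, List.filter_map, List.map_map]
  congr 1
  apply List.filter_congr
  intro j _
  exact filter_cond_eq j

-- ===== VERDICT (by name: the statement is the Claim_ definition above) =====
theorem solution_spec : Claim_equal_solution := by
  intro x _
  unfold Spec_solution solution solution_alt
  simp only []
  set cs := x.toList with hcs
  rw [alt_kept_eq]
  by_cases hh : ∃ j, j < cs.length ∧ cs.getD j ' ' = 'h'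
  · set P : Nat → Prop := fun j => j < cs.length ∧ cs.getD j ' ' = 'h' with hP
    have hdec : DecidablePred P := fun j => by rw [hP]; infer_instance
    obtain ⟨j0, hj0, hj0h⟩ := hh
    set f := Nat.find (⟨j0, hj0, hj0h⟩ : ∃ j, P j) with hf
    set l := Nat.findGreatest P cs.length with hl
    have hfP : P f := Nat.find_spec _
    have hlP : P l := Nat.findGreatest_spec (le_of_lt hj0) ⟨hj0, hj0h⟩
    have hfmin : ∀ j < f, cs.getD j ' ' ≠ 'h' := by
      intro j hj habs
      by_cases hjn : j < cs.length
      · exact Nat.find_min _ hj ⟨hjn, habs⟩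
      · rw [List.getD_eq_default _ _ (by omega)] at habs
        exact absurd habs (by decide)
    have hlmax : ∀ j, l < j → j < cs.length → cs.getD j ' ' ≠ 'h' := by
      intro j hj hjn habs
      exact Nat.findGreatest_is_greatest hj (le_of_lt hjn) ⟨hjn, habs⟩
    rw [inv_loop cs f l hfP.1 hfP.2 hfmin hlP.1 hlP.2 hlmax cs.length le_rfl]
    rw [find_single cs f hfP.1 hfP.2 hfmin, rfind_single cs l hlP.1 hlP.2 hlmax]
    rfl
  · push Not at hh
    have hno : ∀ j < cs.length, cs.getD j ' ' ≠ 'h' := fun j hj => hh j hj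
    rw [inv_loop_nh cs hno cs.length le_rfl]
    congr 2
    apply List.map_congr_left
    intro j hj
    have hjn : j < cs.length := by
      have := List.of_mem_filter hj
      have hmem := List.mem_filter.mp hj
      simpa using List.mem_range.mp hmem.1
    exact (markChar_of_ne _ _ _ _ (hno j hjn)).symm
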